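-- pv_equiv track=rewrite | github.com/tannousgeagea/perceptra-zero-shot | perceptra_zero_shot/models/grounding_dino.py | _match_label_to_prompt
-- ===== SOURCE A (Python) =====
-- from typing import List, Union, Optional
--
-- def _match_label_to_prompt(label: str, prompts: List[str]) -> str:
--     """
--     Match detected label to original prompt.
--
--     Args:
--         label: Detected label from model
--         prompts: Original input prompts
--
--     Returns:
--         Best matching prompt or the label itself
--     """
--     label_lower = label.lower().strip()
--
--     # Direct match
--     for prompt in prompts:
--         if prompt.lower().strip() == label_lower:
--             return prompt
--
--     # Partial match
--     for prompt in prompts: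
--         if label_lower in prompt.lower() or prompt.lower() in label_lower:
--             return prompt
--
--     # Return label as-is if no match
--     return label
-- ===== SOURCE B (Python) =====
-- def _match_label_to_prompt(label, prompts):
--     """Build the answer back-to-front: fold over the prompts in reverse,
--     carrying (answer, exact_found). An exact match always overwrites (so the
--     leftmost exact wins); a partial match overwrites only while no exact match
--     exists to its right, so exact matches keep priority and the leftmost
--     partial wins when no exact exists."""
--     label_lower = label.lower().strip()
--     ans, exact_found = label, False
--     for prompt in reversed(prompts):
--         pl = prompt.lower()
--         if pl.strip() == label_lower:
--             ans, exact_found = prompt, True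
--         elif not exact_found and (label_lower in pl or pl in label_lower):
--             ans = prompt
--     return ans
-- ===== Notes on version B (the rewrite author's own statement) =====
-- stated objective: alternative
-- what changed: Replaces A's two forward scans with a single backwards fold that builds the answer back-to-front in a (answer, exact_found) pair: exact matches always overwrite, partial matches overwrite only while no exact match lies to the right.
import Mathlib
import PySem

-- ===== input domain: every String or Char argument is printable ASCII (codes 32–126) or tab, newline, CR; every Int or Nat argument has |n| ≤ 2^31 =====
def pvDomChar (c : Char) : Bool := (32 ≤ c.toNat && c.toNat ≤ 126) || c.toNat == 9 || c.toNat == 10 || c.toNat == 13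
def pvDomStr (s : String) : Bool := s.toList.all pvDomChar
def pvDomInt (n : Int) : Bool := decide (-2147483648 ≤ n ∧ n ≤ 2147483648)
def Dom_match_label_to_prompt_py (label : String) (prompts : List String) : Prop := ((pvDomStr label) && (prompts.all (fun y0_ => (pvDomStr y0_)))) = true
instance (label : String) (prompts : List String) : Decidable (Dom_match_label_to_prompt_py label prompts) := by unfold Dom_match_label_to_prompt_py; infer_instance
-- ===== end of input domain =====

-- B replaces A's two forward scans by a single backwards fold carrying an (answer, exact_found) pair (objective: alternative decomposition).

-- ===== PORT A =====
-- first for-loop: return the first prompt with prompt.lower().strip() == label_lower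
def pvDirectA (ll : String) : List String → Option String
  | [] => none
  | p :: t => if PySem.Str.strip (PySem.Str.lower p) = ll then some p else pvDirectA ll t

-- second for-loop: return the first prompt with label_lower in prompt.lower() or prompt.lower() in label_lower
def pvPartialA (ll : String) : List String → Option String
  | [] => none
  | p :: t =>
      if PySem.Str.isIn ll (PySem.Str.lower p) || PySem.Str.isIn (PySem.Str.lower p) ll then some p
      else pvPartialA ll t

def match_label_to_prompt_py (label : String) (prompts : List String) : String :=
  let ll := PySem.Str.strip (PySem.Str.lower label)
  match pvDirectA ll prompts with
  | some p => p
  | none =>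
    match pvPartialA ll prompts with
    | some p => p
    | none => label

-- ===== PORT B =====
-- loop body of B: update the carried (answer, exact_found) pair for one prompt
def pvStepB (ll p : String) (st : String × Bool) : String × Bool :=
  let pl := PySem.Str.lower p
  if PySem.Str.strip pl = ll then (p, true)
  else if !st.2 && (PySem.Str.isIn ll pl || PySem.Str.isIn pl ll) then (p, st.2)
  else st

-- the 'for prompt in reversed(prompts)' loop is the right fold of pvStepB
def match_label_to_prompt_py_alt (label : String) (prompts : List String) : String :=
  let ll := PySem.Str.strip (PySem.Str.lower label)
  (List.foldr (pvStepB ll) (label, false) prompts).1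

-- ===== PRECONDITION & SPEC =====
def Spec_match_label_to_prompt_py (label : String) (prompts : List String) (out : String) : Prop := out = match_label_to_prompt_py_alt label prompts
instance (label : String) (prompts : List String) (out : String) : Decidable (Spec_match_label_to_prompt_py label prompts out) := by unfold Spec_match_label_to_prompt_py; infer_instance

-- ===== CLAIM (what is proved, stated in full; the proofs are below) =====
def Claim_equal_match_label_to_prompt_py : Prop := ∀ (label : String) (prompts : List String), Dom_match_label_to_prompt_py label prompts → Spec_match_label_to_prompt_py label prompts (match_label_to_prompt_py label prompts)

-- ===== LEMMAS AND PROOFS =====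
-- invariant of B's backwards fold: the carried pair is (A's answer for this suffix, whether the suffix has an exact match)
theorem pvFoldB_eq (ll label : String) (l : List String) :
    List.foldr (pvStepB ll) (label, false) l =
      ((match pvDirectA ll l with
        | some p => p
        | none => match pvPartialA ll l with
          | some p => p
          | none => label),
       (pvDirectA ll l).isSome) := by
  induction l with
  | nil => simp [pvDirectA, pvPartialA]
  | cons p t ih =>
      simp only [List.foldr_cons, ih, pvStepB, pvDirectA, pvPartialA]
      by_cases h : PySem.Str.strip (PySem.Str.lower p) = ll
      · simp [h]
      · simp only [if_neg h]
        cases hd : pvDirectA ll t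
        · split_ifs <;> simp_all
        · simp

-- ===== VERDICT (by name: the statement is the Claim_ definition above) =====
theorem match_label_to_prompt_py_spec : Claim_equal_match_label_to_prompt_py := by
  intro label prompts _
  unfold Spec_match_label_to_prompt_py match_label_to_prompt_py match_label_to_prompt_py_alt
  simp only [pvFoldB_eq]
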